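-- pv_equiv track=rewrite | github.com/alowprice23/Triangulum1 | fixwurx_eval/fixwurx_repair/fixwurx_backup/repair.py | ripple_sort
-- ===== SOURCE A (Python) =====
-- from collections import defaultdict
-- from typing import Dict, List, Set, Callable
--
-- Graph = Dict[str, Set[str]]
--
-- SCC = List[str]
--
-- def ripple_sort(graph: Graph, sccs: List[SCC]) -> List[SCC]:
--     """
--     Sort SCCs by "ripple score" to minimize downstream breaks.
--     """
--     scc_graph = _build_scc_graph(graph, sccs)
--
--     memo = {}
--     def get_downstream_size(scc_id: int) -> int:
--         if scc_id in memo: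
--             return memo[scc_id]
--
--         size = len(sccs[scc_id])
--         for neighbor_id in scc_graph.get(scc_id, []):
--             size += get_downstream_size(neighbor_id)
--
--         memo[scc_id] = size
--         return size
--
--     scores = {i: get_downstream_size(i) for i in range(len(sccs))}
--
--     sorted_indices = sorted(scores.keys(), key=lambda i: scores[i], reverse=True)
--
--     return [sccs[i] for i in sorted_indices]
--
-- def _build_scc_graph(graph: Graph, sccs: List[SCC]) -> Dict[int, Set[int]]:
--     """Condense the file graph into an SCC graph."""
--     node_to_scc_id = {}
--     for i, scc in enumerate(sccs):
--         for node in scc: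
--             node_to_scc_id[node] = i
--
--     scc_graph: Dict[int, Set[int]] = defaultdict(set)
--     for u, neighbors in graph.items():
--         u_id = node_to_scc_id[u]
--         for v in neighbors:
--             v_id = node_to_scc_id.get(v)
--             if v_id is not None and u_id != v_id:
--                 scc_graph[u_id].add(v_id)
--
--     return scc_graph
-- ===== SOURCE B (Python) =====
-- from collections import defaultdict
--
-- def ripple_sort(graph, sccs):
--     """
--     Sort SCCs by "ripple score" to minimize downstream breaks.
--     Iterative dynamic programming: relax the score vector len(sccs) times
--     instead of memoized recursion.
--     """
--     scc_graph = _build_scc_graph(graph, sccs)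
--     n = len(sccs)
--     score = [len(scc) for scc in sccs]
--     for _ in range(n):
--         score = [len(sccs[i]) + sum(score[j] for j in scc_graph.get(i, ()))
--                  for i in range(n)]
--     order = sorted(range(n), key=lambda i: score[i], reverse=True)
--     return [sccs[i] for i in order]
--
-- def _build_scc_graph(graph, sccs):
--     """Condense the file graph into an SCC graph."""
--     node_to_scc_id = {}
--     for i, scc in enumerate(sccs):
--         for node in scc:
--             node_to_scc_id[node] = i
--     scc_graph = defaultdict(set)
--     for u, neighbors in graph.items():
--         u_id = node_to_scc_id[u]
--         for v in neighbors:
--             v_id = node_to_scc_id.get(v)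
--             if v_id is not None and u_id != v_id:
--                 scc_graph[u_id].add(v_id)
--     return scc_graph
-- ===== Notes on version B (the rewrite author's own statement) =====
-- stated objective: alternative
-- what changed: Replaces the memoized recursive get_downstream_size (recursion over the SCC DAG with a memo dict) by an iterative dynamic-programming relaxation: the whole score vector is recomputed len(sccs) times from the condensed graph, which reaches the same fixpoint on an acyclic SCC graph; no recursion and no memo remain.
import Mathlib
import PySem

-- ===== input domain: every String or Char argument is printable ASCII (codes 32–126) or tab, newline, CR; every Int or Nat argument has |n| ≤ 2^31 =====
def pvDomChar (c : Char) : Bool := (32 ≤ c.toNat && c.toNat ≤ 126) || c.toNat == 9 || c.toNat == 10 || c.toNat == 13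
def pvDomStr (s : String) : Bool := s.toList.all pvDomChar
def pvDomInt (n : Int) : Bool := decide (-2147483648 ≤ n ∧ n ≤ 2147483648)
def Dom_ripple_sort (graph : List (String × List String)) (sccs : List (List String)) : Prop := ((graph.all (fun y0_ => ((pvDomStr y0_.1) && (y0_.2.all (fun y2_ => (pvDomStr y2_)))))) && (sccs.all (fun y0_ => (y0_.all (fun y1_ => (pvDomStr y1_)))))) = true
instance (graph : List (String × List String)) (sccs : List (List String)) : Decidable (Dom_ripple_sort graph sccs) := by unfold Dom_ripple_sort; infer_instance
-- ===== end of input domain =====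

-- B replaces A's memoized recursive downstream-size computation by an iterative
-- dynamic-programming relaxation of the whole score vector (no recursion, no memo);
-- objective: alternative decomposition of the same exact computation.

-- ===== PORT A =====
-- shared helper: port of _build_scc_graph (used verbatim by both Pythons);
-- `none` = the KeyError `node_to_scc_id[u]` raises when u is in no SCC (excluded by Pre_)
def nodeToSccId (sccs : List (List String)) : PySem.Dict String Int :=
  (PySem.List.enumerate sccs).foldl
    (fun d p => p.2.foldl (fun d node => d.insert node p.1) d) PySem.Dict.empty

def buildSccGraph (graph : List (String × List String)) (sccs : List (List String)) :
    Option (PySem.Dict Int (PySem.Set Int)) :=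
  let n2i := nodeToSccId sccs
  graph.foldl
    (fun acc p =>
      acc.bind fun d =>
        match n2i.get? p.1 with
        | none => none
        | some uid =>
          some (p.2.foldl
            (fun d v =>
              match n2i.get? v with
              | some vid =>
                if uid ≠ vid then d.insert uid (PySem.Set.add (d.getD uid []) vid) else d
              | none => d)
            d))
    (some PySem.Dict.empty)

-- port of the memoized recursive get_downstream_size; fuel replaces Python's unbounded
-- recursion (none = the recursion would not terminate; unreachable under Pre_)
def getDownstream (sccs : List (List String)) (sccGraph : PySem.Dict Int (PySem.Set Int)) :
    Nat → PySem.Dict Int Int → Int → Option (Int × PySem.Dict Int Int)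
  | 0, _, _ => none
  | fuel+1, memo, sccId =>
    match memo.get? sccId with
    | some v => some (v, memo)
    | none =>
      (((sccGraph.getD sccId []).foldl
          (fun st j => st.bind fun sm =>
            (getDownstream sccs sccGraph fuel sm.2 j).map fun vm => (sm.1 + vm.1, vm.2))
          (some (((PySem.List.pyGetD sccs sccId []).length : Int), memo))).map
        fun sm => (sm.1, sm.2.insert sccId sm.1))

def ripple_sort (graph : List (String × List String)) (sccs : List (List String)) : List (List String) :=
  match buildSccGraph graph sccs with
  | none => []  -- KeyError propagates; excluded by Pre_
  | some sccGraph =>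
    let n := sccs.length
    match (PySem.List.pyRange 0 (n : Int) 1).foldl
        (fun st i => st.bind fun sm =>
          (getDownstream sccs sccGraph (n+1) sm.2 i).map fun vm => (sm.1.insert i vm.1, vm.2))
        (some (PySem.Dict.empty, PySem.Dict.empty)) with
    | none => []  -- fuel exhausted: only on a cyclic SCC graph, excluded by Pre_
    | some (scores, _) =>
      (PySem.List.sorted scores.keys (fun i => scores.getD i 0) true).map
        (fun i => PySem.List.pyGetD sccs i [])

-- ===== PORT B =====
def ripple_sort_alt (graph : List (String × List String)) (sccs : List (List String)) : List (List String) :=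
  match buildSccGraph graph sccs with
  | none => []  -- KeyError in the shared _build_scc_graph; excluded by Pre_
  | some sccGraph =>
    let n := sccs.length
    let score0 : List Int := sccs.map (fun scc => (scc.length : Int))
    let score := (PySem.List.pyRange 0 (n : Int) 1).foldl
      (fun score _ =>
        (PySem.List.pyRange 0 (n : Int) 1).map (fun i =>
          ((PySem.List.pyGetD sccs i []).length : Int) +
            ((sccGraph.getD i []).map (fun j => PySem.List.pyGetD score j 0)).sum))
      score0
    (PySem.List.sorted (PySem.List.pyRange 0 (n : Int) 1)
        (fun i => PySem.List.pyGetD score i 0) true).map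
      (fun i => PySem.List.pyGetD sccs i [])

-- ===== PRECONDITION & SPEC =====
-- declarative view of the condensed graph, used only by Pre_ (independent of the ports)
-- pvSccId sccs v = index of the LAST scc containing v (= node_to_scc_id's entry)
def pvSccId (sccs : List (List String)) (v : String) : Option Int :=
  (PySem.List.enumerate sccs).foldl (fun acc p => if v ∈ p.2 then some p.1 else acc) none

def pvEdge (graph : List (String × List String)) (sccs : List (List String)) (i j : Int) : Bool :=
  i != j && graph.any (fun p =>
    pvSccId sccs p.1 == some i && p.2.any (fun v => pvSccId sccs v == some j))

-- pvPath … k i = "there is a directed path of k edges starting at SCC i in the condensed graph"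
def pvPath (graph : List (String × List String)) (sccs : List (List String)) : Nat → Int → Bool
  | 0, _ => true
  | k+1, i => (List.range sccs.length).any
      (fun j => pvEdge graph sccs i (j : Int) && pvPath graph sccs k (j : Int))

-- Pre_ excludes exactly the inputs where Python A raises: a KeyError when some key of
-- `graph` lies in no SCC, and the unbounded recursion (RecursionError) when the condensed
-- SCC graph has a cycle, i.e. a directed path of len(sccs) edges.
def Pre_ripple_sort (graph : List (String × List String)) (sccs : List (List String)) : Prop :=
  (∀ p ∈ graph, ∃ scc ∈ sccs, p.1 ∈ scc) ∧
  (∀ m ∈ List.range sccs.length, pvPath graph sccs sccs.length (m : Int) = false)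
instance (graph : List (String × List String)) (sccs : List (List String)) : Decidable (Pre_ripple_sort graph sccs) := by unfold Pre_ripple_sort; infer_instance

def pvWitness_ripple_sort : (List (String × List String)) × List (List String) :=
  ([("a", ["b"])], [["a"], ["b"]])

def Spec_ripple_sort (graph : List (String × List String)) (sccs : List (List String)) (out : List (List String)) : Prop := out = ripple_sort_alt graph sccs
instance (graph : List (String × List String)) (sccs : List (List String)) (out : List (List String)) : Decidable (Spec_ripple_sort graph sccs out) := by unfold Spec_ripple_sort; infer_instance

-- ===== CLAIM (what is proved, stated in full; the proofs are below) =====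
def Claim_equal_ripple_sort : Prop := ∀ (graph : List (String × List String)) (sccs : List (List String)), Dom_ripple_sort graph sccs → Pre_ripple_sort graph sccs → Spec_ripple_sort graph sccs (ripple_sort graph sccs)

-- ===== LEMMAS AND PROOFS =====

-- the pure downstream-size function, by fuel
def pvF (sccs : List (List String)) (g : PySem.Dict Int (PySem.Set Int)) : Nat → Int → Int
  | 0, i => ((PySem.List.pyGetD sccs i []).length : Int)
  | k+1, i => ((PySem.List.pyGetD sccs i []).length : Int) +
      ((g.getD i []).map (pvF sccs g k)).sum


-- generic dict-fold facts ---------------------------------------------------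

theorem get?_foldl_insert_const (scc : List String) (d : PySem.Dict String Int) (a : Int)
    (v : String) :
    (scc.foldl (fun d node => d.insert node a) d).get? v
      = if v ∈ scc then some a else d.get? v := by
  induction scc generalizing d with
  | nil => simp
  | cons x t ih =>
    simp only [List.foldl_cons, ih, List.mem_cons]
    rw [PySem.Dict.get?_insert]
    by_cases h1 : v ∈ t <;> by_cases h2 : v = x <;> simp [h1, h2]

theorem get?_nodeToSccId_gen (l : List (Int × List String)) (d : PySem.Dict String Int)
    (v : String) :
    (l.foldl (fun d p => p.2.foldl (fun d node => d.insert node p.1) d) d).get? v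
      = l.foldl (fun acc p => if v ∈ p.2 then some p.1 else acc) (d.get? v) := by
  induction l generalizing d with
  | nil => rfl
  | cons p t ih =>
    simp only [List.foldl_cons, ih, get?_foldl_insert_const]

theorem n2i_spec (sccs : List (List String)) (v : String) :
    (nodeToSccId sccs).get? v = pvSccId sccs v := by
  unfold nodeToSccId pvSccId
  rw [get?_nodeToSccId_gen]
  simp [PySem.Dict.get?_empty]

theorem pvSccId_bounds (sccs : List (List String)) (v : String) (i : Int)
    (h : pvSccId sccs v = some i) : 0 ≤ i ∧ i < (sccs.length : Int) := by
  unfold pvSccId at h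
  have gen : ∀ (l : List (Int × List String)) (acc : Option Int),
      l.foldl (fun acc p => if v ∈ p.2 then some p.1 else acc) acc = some i →
      (∃ p ∈ l, p.1 = i) ∨ acc = some i := by
    intro l
    induction l with
    | nil => intro acc h; exact Or.inr h
    | cons p t ih =>
      intro acc h
      rcases ih _ h with h1 | h1
      · obtain ⟨q, hq, hq2⟩ := h1
        exact Or.inl ⟨q, List.mem_cons_of_mem _ hq, hq2⟩
      · by_cases hv : v ∈ p.2
        · simp [hv] at h1
          exact Or.inl ⟨p, List.mem_cons_self, h1⟩
        · simp [hv] at h1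
          exact Or.inr h1
  rcases gen _ _ h with h1 | h1
  · obtain ⟨p, hp, hp2⟩ := h1
    have : p.1 ∈ (PySem.List.enumerate sccs 0).map (·.1) := List.mem_map_of_mem hp
    rw [PySem.List.map_fst_enumerate] at this
    rw [PySem.List.mem_pyRange_one] at this
    omega
  · simp at h1

-- the adjacency invariant of the built SCC graph -----------------------------

def EdgeOK (graph : List (String × List String)) (sccs : List (List String))
    (d : PySem.Dict Int (PySem.Set Int)) : Prop :=
  ∀ i j : Int, j ∈ d.getD i [] →
    pvEdge graph sccs i j = true ∧ 0 ≤ j ∧ j < (sccs.length : Int)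

theorem build_edgeOK (graph : List (String × List String)) (sccs : List (List String))
    (g : PySem.Dict Int (PySem.Set Int)) (h : buildSccGraph graph sccs = some g) :
    EdgeOK graph sccs g := by
  unfold buildSccGraph at h
  -- generalize over the graph entries actually folded, remembering they are in `graph`
  suffices gen : ∀ (l : List (String × List String)), (∀ p ∈ l, p ∈ graph) →
      ∀ (d : PySem.Dict Int (PySem.Set Int)), EdgeOK graph sccs d →
      l.foldl
        (fun acc p =>
          acc.bind fun d =>
            match (nodeToSccId sccs).get? p.1 with
            | none => none
            | some uid =>
              some (p.2.foldl
                (fun d v =>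
                  match (nodeToSccId sccs).get? v with
                  | some vid =>
                    if uid ≠ vid then d.insert uid (PySem.Set.add (d.getD uid []) vid) else d
                  | none => d)
                d))
        (some d) = some g → EdgeOK graph sccs g by
    refine gen graph (fun p hp => hp) PySem.Dict.empty ?_ h
    intro i j hj
    simp [PySem.Dict.getD_empty] at hj
  intro l
  induction l with
  | nil =>
    intro _ d hd h
    simp at h
    exact h ▸ hd
  | cons p t ih =>
    intro hsub d hd h
    simp only [List.foldl_cons, Option.bind_some] at h
    cases hu : (nodeToSccId sccs).get? p.1 with
    | none =>
      rw [hu] at h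
      have : ∀ (t : List (String × List String)),
          t.foldl (fun acc p =>
            acc.bind fun d =>
              match (nodeToSccId sccs).get? p.1 with
              | none => none
              | some uid =>
                some (p.2.foldl
                  (fun d v =>
                    match (nodeToSccId sccs).get? v with
                    | some vid =>
                      if uid ≠ vid then d.insert uid (PySem.Set.add (d.getD uid []) vid) else d
                    | none => d)
                  d))
            (none : Option (PySem.Dict Int (PySem.Set Int))) = none := by
        intro t; induction t with
        | nil => rfl
        | cons q tq ihq => simpa using ihq
      rw [this] at h
      exact absurd h (by simp)
    | some uid =>
      rw [hu] at h
      refine ih (fun q hq => hsub q (List.mem_cons_of_mem _ hq)) _ ?_ h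
      -- the inner fold preserves EdgeOK
      have hp : p ∈ graph := hsub p List.mem_cons_self
      have hu' : pvSccId sccs p.1 = some uid := by rw [← n2i_spec]; exact hu
      suffices inner : ∀ (vl : List String), (∀ v ∈ vl, v ∈ p.2) →
          ∀ (d : PySem.Dict Int (PySem.Set Int)), EdgeOK graph sccs d →
          EdgeOK graph sccs (vl.foldl
            (fun d v =>
              match (nodeToSccId sccs).get? v with
              | some vid =>
                if uid ≠ vid then d.insert uid (PySem.Set.add (d.getD uid []) vid) else d
              | none => d)
            d) from inner p.2 (fun v hv => hv) d hd
      intro vl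
      induction vl with
      | nil => intro _ d hd; exact hd
      | cons v tv ihv =>
        intro hvsub d hd
        simp only [List.foldl_cons]
        refine ihv (fun w hw => hvsub w (List.mem_cons_of_mem _ hw)) _ ?_
        cases hv : (nodeToSccId sccs).get? v with
        | none => dsimp only; exact hd
        | some vid =>
          dsimp only
          by_cases hne : uid ≠ vid
          · rw [if_pos hne]
            have hv' : pvSccId sccs v = some vid := by rw [← n2i_spec]; exact hv
            intro i j hj
            rw [PySem.Dict.getD_insert] at hj
            by_cases hi : i = uid
            · rw [if_pos hi] at hj
              rw [PySem.Set.mem_add] at hj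
              rcases hj with hj | hj
              · exact hi ▸ hd uid j hj
              · subst hj; subst hi
                refine ⟨?_, (pvSccId_bounds sccs v j hv').1, (pvSccId_bounds sccs v j hv').2⟩
                unfold pvEdge
                rw [Bool.and_eq_true, List.any_eq_true]
                constructor
                · simpa using hne
                · refine ⟨p, hp, ?_⟩
                  rw [Bool.and_eq_true, List.any_eq_true]
                  refine ⟨by simp [hu'], v, hvsub v List.mem_cons_self, by simp [hv']⟩
            · rw [if_neg hi] at hj
              exact hd i j hj
          · rw [if_neg hne]
            exact hd

-- path facts -----------------------------------------------------------------

theorem pvPath_succ_of (graph : List (String × List String)) (sccs : List (List String))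
    (k : Nat) (i j : Int) (he : pvEdge graph sccs i j = true) (h0 : 0 ≤ j)
    (h1 : j < (sccs.length : Int)) (hp : pvPath graph sccs k j = true) :
    pvPath graph sccs (k+1) i = true := by
  show (List.range sccs.length).any _ = true
  rw [List.any_eq_true]
  refine ⟨j.toNat, ?_, ?_⟩
  · rw [List.mem_range]; omega
  · have hj : ((j.toNat : Nat) : Int) = j := by omega
    rw [hj, Bool.and_eq_true]
    exact ⟨he, hp⟩

theorem pvPath_mono (graph : List (String × List String)) (sccs : List (List String))
    (k : Nat) (i : Int) (h : pvPath graph sccs (k+1) i = true) :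
    pvPath graph sccs k i = true := by
  induction k generalizing i with
  | zero => rfl
  | succ k ih =>
    have h' : (List.range sccs.length).any
        (fun j => pvEdge graph sccs i (j : Int) && pvPath graph sccs (k+1) (j : Int)) = true := h
    rw [List.any_eq_true] at h'
    obtain ⟨j, hjm, hj⟩ := h'
    rw [Bool.and_eq_true] at hj
    show (List.range sccs.length).any _ = true
    rw [List.any_eq_true]
    exact ⟨j, hjm, by rw [Bool.and_eq_true]; exact ⟨hj.1, ih _ hj.2⟩⟩

theorem pvPath_false_le (graph : List (String × List String)) (sccs : List (List String))
    (k k' : Nat) (hk : k ≤ k') (h : pvPath graph sccs k i = false) :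
    pvPath graph sccs k' i = false := by
  induction k' with
  | zero =>
    have : k = 0 := by omega
    exact this ▸ h
  | succ k' ih =>
    rcases Nat.lt_or_ge k (k'+1) with hlt | hge
    · have hk' : pvPath graph sccs k' i = false := ih (by omega)
      cases hck : pvPath graph sccs (k'+1) i with
      | false => rfl
      | true => rw [pvPath_mono graph sccs k' i hck] at hk'; exact hk'
    · have : k = k' + 1 := by omega
      exact this ▸ h

-- stabilisation of pvF on an acyclic condensed graph -------------------------

theorem pvF_stab (graph : List (String × List String)) (sccs : List (List String))
    (g : PySem.Dict Int (PySem.Set Int)) (hE : EdgeOK graph sccs g) :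
    ∀ (k m : Nat) (i : Int), pvPath graph sccs k i = false →
      pvF sccs g (k + m) i = pvF sccs g k i := by
  intro k
  induction k with
  | zero => intro m i h; exact absurd h (by simp [pvPath])
  | succ k ih =>
    intro m i h
    have he : k + 1 + m = (k + m) + 1 := by omega
    rw [he]
    show ((PySem.List.pyGetD sccs i []).length : Int) +
        ((g.getD i []).map (pvF sccs g (k+m))).sum
      = ((PySem.List.pyGetD sccs i []).length : Int) +
        ((g.getD i []).map (pvF sccs g k)).sum
    congr 1
    apply congrArg
    apply List.map_congr_left
    intro j hj
    obtain ⟨hedge, hj0, hj1⟩ := hE i j hj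
    have hkj : pvPath graph sccs k j = false := by
      cases hc : pvPath graph sccs k j with
      | false => rfl
      | true =>
        rw [pvPath_succ_of graph sccs k i j hedge hj0 hj1 hc] at h
        exact absurd h (by simp)
    exact ih m j hkj

-- A-side: the memoized recursion computes pvF n -------------------------------

def MemoOK (sccs : List (List String)) (g : PySem.Dict Int (PySem.Set Int))
    (memo : PySem.Dict Int Int) : Prop :=
  ∀ k v, memo.get? k = some v → v = pvF sccs g sccs.length k

theorem getDown_ok (graph : List (String × List String)) (sccs : List (List String))
    (g : PySem.Dict Int (PySem.Set Int)) (hE : EdgeOK graph sccs g)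
    (Hnp : ∀ m ∈ List.range sccs.length, pvPath graph sccs sccs.length (m : Int) = false) :
    ∀ (f : Nat) (i : Int) (memo : PySem.Dict Int Int), MemoOK sccs g memo →
      pvPath graph sccs f i = false → 0 ≤ i → i < (sccs.length : Int) →
      ∃ memo', getDownstream sccs g f memo i = some (pvF sccs g sccs.length i, memo')
        ∧ MemoOK sccs g memo' := by
  intro f
  induction f with
  | zero => intro i memo _ h; exact absurd h (by simp [pvPath])
  | succ f ih =>
    intro i memo hM h h0 h1
    show ∃ memo',
      (match memo.get? i with
      | some v => some (v, memo)
      | none =>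
        (((g.getD i []).foldl
            (fun st j => st.bind fun sm =>
              (getDownstream sccs g f sm.2 j).map fun vm => (sm.1 + vm.1, vm.2))
            (some (((PySem.List.pyGetD sccs i []).length : Int), memo))).map
          fun sm => (sm.1, sm.2.insert i sm.1))) = some (pvF sccs g sccs.length i, memo')
        ∧ MemoOK sccs g memo'
    cases hm : memo.get? i with
    | some v =>
      refine ⟨memo, ?_, hM⟩
      dsimp only
      rw [hM i v hm]
    | none =>
      dsimp only
      -- the fold over the adjacency list
      have inner : ∀ (l : List Int), (∀ j ∈ l, j ∈ g.getD i []) →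
          ∀ (acc : Int) (memo : PySem.Dict Int Int), MemoOK sccs g memo →
          ∃ memo', l.foldl
              (fun st j => st.bind fun sm =>
                (getDownstream sccs g f sm.2 j).map fun vm => (sm.1 + vm.1, vm.2))
              (some (acc, memo))
            = some (acc + (l.map (pvF sccs g sccs.length)).sum, memo')
            ∧ MemoOK sccs g memo' := by
        intro l
        induction l with
        | nil => intro _ acc memo hM; exact ⟨memo, by simp, hM⟩
        | cons j t iht =>
          intro hsub acc memo hM
          have hjadj : j ∈ g.getD i [] := hsub j List.mem_cons_self
          obtain ⟨hedge, hj0, hj1⟩ := hE i j hjadj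
          have hfj : pvPath graph sccs f j = false := by
            cases hc : pvPath graph sccs f j with
            | false => rfl
            | true =>
              rw [pvPath_succ_of graph sccs f i j hedge hj0 hj1 hc] at h
              exact absurd h (by simp)
          obtain ⟨memo1, hrun, hM1⟩ := ih j memo hM hfj hj0 hj1
          obtain ⟨memo2, hrun2, hM2⟩ :=
            iht (fun w hw => hsub w (List.mem_cons_of_mem _ hw))
              (acc + pvF sccs g sccs.length j) memo1 hM1
          refine ⟨memo2, ?_, hM2⟩
          simp only [List.foldl_cons, Option.bind_some, hrun, Option.map_some]
          rw [hrun2]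
          simp only [List.map_cons, List.sum_cons]
          congr 2
          ring
      obtain ⟨memo', hrun, hM'⟩ :=
        inner (g.getD i []) (fun j hj => hj) ((PySem.List.pyGetD sccs i []).length : Int) memo hM
      rw [hrun]
      have hval : ((PySem.List.pyGetD sccs i []).length : Int) +
          ((g.getD i []).map (pvF sccs g sccs.length)).sum = pvF sccs g sccs.length i := by
        have h1' : pvPath graph sccs sccs.length i = false := by
          have hi : (i.toNat) ∈ List.range sccs.length := by
            rw [List.mem_range]; omega
          have := Hnp i.toNat hi
          have hj : ((i.toNat : Nat) : Int) = i := by omega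
          rwa [hj] at this
        have hdef : pvF sccs g (sccs.length + 1) i
            = ((PySem.List.pyGetD sccs i []).length : Int) +
              ((g.getD i []).map (pvF sccs g sccs.length)).sum := rfl
        rw [← hdef]
        exact pvF_stab graph sccs g hE sccs.length 1 i h1'
      refine ⟨memo'.insert i (((PySem.List.pyGetD sccs i []).length : Int) +
        ((g.getD i []).map (pvF sccs g sccs.length)).sum), ?_, ?_⟩
      · simp only [Option.map_some]
        rw [hval]
      · intro k v hk
        rw [PySem.Dict.get?_insert] at hk
        by_cases hki : k = i
        · rw [if_pos hki] at hk
          injection hk with hk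
          rw [← hk, hki]
          exact hval
        · rw [if_neg hki] at hk
          exact hM' k v hk

theorem scores_fold (graph : List (String × List String)) (sccs : List (List String))
    (g : PySem.Dict Int (PySem.Set Int)) (hE : EdgeOK graph sccs g)
    (Hnp : ∀ m ∈ List.range sccs.length, pvPath graph sccs sccs.length (m : Int) = false) :
    ∀ (l : List Int) (sc : PySem.Dict Int Int) (memo : PySem.Dict Int Int),
      MemoOK sccs g memo →
      (∀ i ∈ l, 0 ≤ i ∧ i < (sccs.length : Int) ∧ pvPath graph sccs (sccs.length + 1) i = false) →
      ∃ memo', l.foldl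
          (fun st i => st.bind fun sm =>
            (getDownstream sccs g (sccs.length + 1) sm.2 i).map fun vm => (sm.1.insert i vm.1, vm.2))
          (some (sc, memo))
        = some (l.foldl (fun d i => d.insert i (pvF sccs g sccs.length i)) sc, memo') := by
  intro l
  induction l with
  | nil => intro sc memo hM _; exact ⟨memo, by simp⟩
  | cons i t ih =>
    intro sc memo hM hcond
    obtain ⟨h0, h1, hp⟩ := hcond i List.mem_cons_self
    obtain ⟨memo1, hrun, hM1⟩ := getDown_ok graph sccs g hE Hnp (sccs.length + 1) i memo hM hp h0 h1
    obtain ⟨memo2, hrun2⟩ :=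
      ih (sc.insert i (pvF sccs g sccs.length i)) memo1 hM1
        (fun j hj => hcond j (List.mem_cons_of_mem _ hj))
    refine ⟨memo2, ?_⟩
    simp only [List.foldl_cons, Option.bind_some, hrun, Option.map_some]
    exact hrun2

theorem getD_foldl_insert_fun (f : Int → Int) (l : List Int) (d : PySem.Dict Int Int) (i : Int) :
    (l.foldl (fun d j => d.insert j (f j)) d).getD i 0
      = if i ∈ l then f i else d.getD i 0 := by
  induction l generalizing d with
  | nil => simp
  | cons x t ih =>
    simp only [List.foldl_cons, ih, List.mem_cons]
    rw [PySem.Dict.getD_insert]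
    by_cases h1 : i ∈ t <;> by_cases h2 : i = x <;> simp [h1, h2]

-- B-side ----------------------------------------------------------------------

theorem foldl_const_iterate {α β : Type} (S : α → α) (l : List β) (s : α) :
    l.foldl (fun s _ => S s) s = S^[l.length] s := by
  induction l generalizing s with
  | nil => rfl
  | cons x t ih =>
    simp only [List.foldl_cons, List.length_cons, ih, Function.iterate_succ_apply]

theorem B_value (graph : List (String × List String)) (sccs : List (List String))
    (g : PySem.Dict Int (PySem.Set Int)) (hE : EdgeOK graph sccs g) :
    ∀ (k : Nat) (i : Int), 0 ≤ i → i < (sccs.length : Int) →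
      PySem.List.pyGetD
        ((fun score => (PySem.List.pyRange 0 (sccs.length : Int) 1).map (fun i =>
            ((PySem.List.pyGetD sccs i []).length : Int) +
              ((g.getD i []).map (fun j => PySem.List.pyGetD score j 0)).sum))^[k]
          (sccs.map (fun scc => (scc.length : Int)))) i 0
      = pvF sccs g k i := by
  intro k
  induction k with
  | zero =>
    intro i h0 h1
    show PySem.List.pyGetD (sccs.map (fun scc => (scc.length : Int))) i 0 = _
    have hd : ((([] : List String).length : Nat) : Int) = 0 := by simp
    rw [← hd, PySem.List.pyGetD_map (fun scc => ((scc.length : Nat) : Int)) sccs i []]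
    rfl
  | succ k ih =>
    intro i h0 h1
    rw [Function.iterate_succ_apply']
    rw [PySem.List.pyGetD_map_pyRange_of_nonneg _ _ _ _ h0 h1]
    show ((PySem.List.pyGetD sccs i []).length : Int) +
        ((g.getD i []).map (fun j => PySem.List.pyGetD _ j 0)).sum
      = ((PySem.List.pyGetD sccs i []).length : Int) +
        ((g.getD i []).map (pvF sccs g k)).sum
    congr 1
    apply congrArg
    apply List.map_congr_left
    intro j hj
    obtain ⟨_, hj0, hj1⟩ := hE i j hj
    exact ih j hj0 hj1

-- sorted congruence -----------------------------------------------------------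

theorem insertBy_congr {α : Type} (b1 b2 : α → α → Bool) (x : α) (ys : List α)
    (h : ∀ y ∈ ys, b1 x y = b2 x y) :
    PySem.List.insertBy b1 x ys = PySem.List.insertBy b2 x ys := by
  induction ys with
  | nil => rfl
  | cons y t ih =>
    show (if b1 x y then x :: y :: t else y :: PySem.List.insertBy b1 x t)
      = (if b2 x y then x :: y :: t else y :: PySem.List.insertBy b2 x t)
    rw [h y List.mem_cons_self, ih (fun z hz => h z (List.mem_cons_of_mem _ hz))]

theorem foldl_insertBy_congr {α : Type} (b1 b2 : α → α → Bool) :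
    ∀ (xs acc : List α), (∀ x, (x ∈ xs ∨ x ∈ acc) → ∀ y, (y ∈ xs ∨ y ∈ acc) → b1 x y = b2 x y) →
      xs.foldl (fun acc x => PySem.List.insertBy b1 x acc) acc
        = xs.foldl (fun acc x => PySem.List.insertBy b2 x acc) acc := by
  intro xs
  induction xs with
  | nil => intro acc _; rfl
  | cons x t ih =>
    intro acc h
    simp only [List.foldl_cons]
    rw [insertBy_congr b1 b2 x acc
      (fun y hy => h x (Or.inl List.mem_cons_self) y (Or.inr hy))]
    apply ih
    intro a ha b hb
    apply h
    · rcases ha with ha | ha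
      · exact Or.inl (List.mem_cons_of_mem _ ha)
      · rcases (PySem.List.mem_insertBy b2 x a acc).1 ha with ha | ha
        · exact Or.inl (ha ▸ List.mem_cons_self)
        · exact Or.inr ha
    · rcases hb with hb | hb
      · exact Or.inl (List.mem_cons_of_mem _ hb)
      · rcases (PySem.List.mem_insertBy b2 x b acc).1 hb with hb | hb
        · exact Or.inl (hb ▸ List.mem_cons_self)
        · exact Or.inr hb

theorem sorted_rev_key_congr {α : Type} (xs : List α) (k1 k2 : α → Int)
    (h : ∀ x ∈ xs, k1 x = k2 x) :
    PySem.List.sorted xs k1 true = PySem.List.sorted xs k2 true := by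
  rw [PySem.List.sorted_rev_eq_foldl_insertBy, PySem.List.sorted_rev_eq_foldl_insertBy]
  apply foldl_insertBy_congr
  intro a ha b hb
  rcases ha with ha | ha
  · rcases hb with hb | hb
    · rw [h a ha, h b hb]
    · exact absurd hb (List.not_mem_nil)
  · exact absurd ha (List.not_mem_nil)


-- ===== VERDICT (by name: the statement is the Claim_ definition above) =====
theorem ripple_sort_spec : Claim_equal_ripple_sort := by
  intro graph sccs _ hpre
  unfold Spec_ripple_sort ripple_sort ripple_sort_alt
  cases hb : buildSccGraph graph sccs with
  | none => rfl
  | some g =>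
    simp only []
    have hE := build_edgeOK graph sccs g hb
    obtain ⟨_, Hnp⟩ := hpre
    -- A side: run the scores fold
    have hcond : ∀ i ∈ PySem.List.pyRange 0 (sccs.length : Int) 1,
        0 ≤ i ∧ i < (sccs.length : Int) ∧ pvPath graph sccs (sccs.length + 1) i = false := by
      intro i hi
      rw [PySem.List.mem_pyRange_one] at hi
      refine ⟨hi.1, hi.2, ?_⟩
      have hn : pvPath graph sccs sccs.length i = false := by
        have hm : i.toNat ∈ List.range sccs.length := by rw [List.mem_range]; omega
        have := Hnp i.toNat hm
        have hj : ((i.toNat : Nat) : Int) = i := by omega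
        rwa [hj] at this
      exact pvPath_false_le graph sccs sccs.length (sccs.length + 1) (by omega) hn
    obtain ⟨memo', hrun⟩ := scores_fold graph sccs g hE Hnp
      (PySem.List.pyRange 0 (sccs.length : Int) 1) PySem.Dict.empty PySem.Dict.empty
      (fun k v hk => absurd hk (by simp [PySem.Dict.get?_empty])) hcond
    rw [hrun]
    simp only []
    -- the scores dict
    have hkeys : ((PySem.List.pyRange 0 (sccs.length : Int) 1).foldl
        (fun d i => d.insert i (pvF sccs g sccs.length i)) PySem.Dict.empty).keys
        = PySem.List.pyRange 0 (sccs.length : Int) 1 := by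
      rw [PySem.Dict.keys_foldl_insert]
      rw [PySem.Dict.keys_empty]
      rw [PySem.Set.update_nil_left]
      exact PySem.Set.ofList_eq_self_of_nodup _ (PySem.List.nodup_pyRange_one 0 _)
    rw [hkeys]
    -- B side: the relaxation loop is an iterate
    rw [foldl_const_iterate]
    have hlen : (PySem.List.pyRange 0 (sccs.length : Int) 1).length = sccs.length := by
      rw [PySem.List.length_pyRange_one]; omega
    rw [hlen]
    -- the two sort keys agree on the sorted list
    rw [sorted_rev_key_congr (PySem.List.pyRange 0 (sccs.length : Int) 1) _ _ ?_]
    intro i hi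
    have hib := (PySem.List.mem_pyRange_one).1 hi
    rw [getD_foldl_insert_fun, if_pos hi]
    exact (B_value graph sccs g hE sccs.length i hib.1 hib.2).symm
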